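-- pv_equiv track=rewrite | github.com/Sekai0NI0itamio/ModCompiler | modcompiler/decompile.py | parse_manifest_attributes
-- ===== SOURCE A (Python) =====
-- def parse_manifest_attributes(text: str) -> dict[str, str]:
--     if not text:
--         return {}
--     attributes: dict[str, str] = {}
--     current_key: str | None = None
--     for raw_line in text.splitlines():
--         if raw_line.startswith(" ") and current_key:
--             attributes[current_key] += raw_line[1:]
--             continue
--         if ":" not in raw_line:
--             current_key = None
--             continue
--         key, value = raw_line.split(":", 1)
--         current_key = key.strip()
--         attributes[current_key] = value.strip()
--     return attributes
-- ===== SOURCE B (Python) =====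
-- def parse_manifest_attributes(text: str) -> dict[str, str]:
--     # Pass 1: group the lines into logical records (key, first_value, continuations).
--     records: list[tuple[str, str, list[str]]] = []
--     current: tuple[str, str, list[str]] | None = None
--     for line in text.splitlines():
--         if line.startswith(" ") and current is not None and current[0]:
--             current[2].append(line[1:])
--         elif ":" in line:
--             if current is not None:
--                 records.append(current)
--             head, rest = line.split(":", 1)
--             current = (head.strip(), rest.strip(), [])
--         else:
--             if current is not None:
--                 records.append(current)
--             current = None
--     if current is not None:
--         records.append(current)
--     # Pass 2: assemble each record's value; last write wins on duplicate keys.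
--     attributes: dict[str, str] = {}
--     for key, value, conts in records:
--         attributes[key] = value + "".join(conts)
--     return attributes
-- ===== Notes on version B (the rewrite author's own statement) =====
-- stated objective: alternative
-- what changed: B replaces A's single streaming loop that mutates the result dict (append-to-dict-entry for continuation lines) with two passes: a grouping pass that collects logical records (key, first value, raw continuation slices) and a separate assembly pass that joins each record and writes it into the dict, last write wins.
import Mathlib
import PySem

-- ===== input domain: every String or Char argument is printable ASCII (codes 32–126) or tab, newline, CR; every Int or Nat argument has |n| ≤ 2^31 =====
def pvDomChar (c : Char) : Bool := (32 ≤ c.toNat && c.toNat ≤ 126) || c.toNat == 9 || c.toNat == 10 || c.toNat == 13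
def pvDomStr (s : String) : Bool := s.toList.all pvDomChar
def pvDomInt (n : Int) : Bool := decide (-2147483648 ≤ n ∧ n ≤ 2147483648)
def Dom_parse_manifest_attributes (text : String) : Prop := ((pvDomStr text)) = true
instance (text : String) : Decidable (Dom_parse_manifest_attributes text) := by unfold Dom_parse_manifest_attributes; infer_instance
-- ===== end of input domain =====

-- B re-groups the lines into logical records in a first pass and assembles the dict in a
-- second pass, instead of A's single streaming loop mutating the dict; same return value.

-- ===== PORT A =====
-- one iteration of A's loop; state = (attributes, current_key)
def stepA (st : PySem.Dict String String × Option String) (raw_line : String) :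
    PySem.Dict String String × Option String :=
  let attributes := st.1
  let current_key := st.2
  if PySem.Str.startswith raw_line " " &&
      (match current_key with | some k => k != "" | none => false) then
    match current_key with
    | some ck =>
        -- attributes[current_key] += raw_line[1:]; key is always present here, so
        -- get-then-set is Dict.modify (the "" default is never used)
        (PySem.Dict.modify attributes ck ""
          (fun v => v ++ PySem.Str.slice raw_line (some 1) none), current_key)
    | none => (attributes, current_key)   -- unreachable: the guard required current_key truthy
  else if !(PySem.Str.isIn ":" raw_line) then
    (attributes, none)
  else
    match PySem.Str.splitMax? raw_line ":" 1 with
    | some (key :: value :: _) =>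
        let ck := PySem.Str.strip key
        (PySem.Dict.insert attributes ck (PySem.Str.strip value), some ck)
    | _ => (attributes, none)             -- unreachable: ":" is in raw_line, so split gives 2 parts

def parse_manifest_attributes (text : String) : List (String × String) :=
  if text == "" then []
  else
    ((PySem.Str.splitlines text).foldl stepA (PySem.Dict.empty, none)).1.items

-- ===== PORT B =====
-- one iteration of B's grouping pass; state = (records, current record)
def stepB (st : List (String × String × List String) × Option (String × String × List String))
    (line : String) :
    List (String × String × List String) × Option (String × String × List String) :=
  let records := st.1
  let current := st.2
  if PySem.Str.startswith line " " &&
      (match current with | some c => c.1 != "" | none => false) then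
    match current with
    | some c => (records, some (c.1, c.2.1, c.2.2 ++ [PySem.Str.slice line (some 1) none]))
    | none => (records, current)          -- unreachable: the guard required a current record
  else if PySem.Str.isIn ":" line then
    match PySem.Str.splitMax? line ":" 1 with
    | some (head :: rest :: _) =>
        (records ++ current.toList,
         some (PySem.Str.strip head, PySem.Str.strip rest, ([] : List String)))
    | _ => (records ++ current.toList, none)   -- unreachable: ":" is in line
  else
    (records ++ current.toList, none)

def parse_manifest_attributes_alt (text : String) : List (String × String) :=
  let st := (PySem.Str.splitlines text).foldl stepB ([], none)
  let records := st.1 ++ st.2.toList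
  (records.foldl
    (fun (d : PySem.Dict String String) (r : String × String × List String) =>
      d.insert r.1 (r.2.1 ++ PySem.Str.join "" r.2.2))
    PySem.Dict.empty).items

-- ===== PRECONDITION & SPEC =====
def Spec_parse_manifest_attributes (text : String) (out : List (String × String)) : Prop := out = parse_manifest_attributes_alt text
instance (text : String) (out : List (String × String)) : Decidable (Spec_parse_manifest_attributes text out) := by unfold Spec_parse_manifest_attributes; infer_instance

-- ===== CLAIM (what is proved, stated in full; the proofs are below) =====
def Claim_equal_parse_manifest_attributes : Prop := ∀ (text : String), Dom_parse_manifest_attributes text → Spec_parse_manifest_attributes text (parse_manifest_attributes text)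

-- ===== LEMMAS AND PROOFS =====

-- B's second pass, as a function of the records list
def pvFinalize (recs : List (String × String × List String)) : PySem.Dict String String :=
  recs.foldl
    (fun (d : PySem.Dict String String) (r : String × String × List String) =>
      d.insert r.1 (r.2.1 ++ PySem.Str.join "" r.2.2))
    PySem.Dict.empty

theorem pv_join_nil : PySem.Str.join "" ([] : List String) = "" := by decide

theorem pv_intercalate_nil {α : Type} (l : List (List α)) :
    List.intercalate [] l = l.flatten := by
  simp only [List.intercalate]
  induction l with
  | nil => rfl
  | cons a t ih =>
    cases t with
    | nil => rfl
    | cons b t2 => simp_all [List.intersperse]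

theorem pv_join_concat (c : List String) (s : String) :
    PySem.Str.join "" (c ++ [s]) = PySem.Str.join "" c ++ s := by
  apply String.toList_inj.mp
  simp [PySem.Str.toList_join, PySem.Chars.join, pv_intercalate_nil]

theorem pv_insert_insert {κ ν : Type} [BEq κ] [LawfulBEq κ]
    (d : PySem.Dict κ ν) (k : κ) (x y : ν) :
    (d.insert k x).insert k y = d.insert k y := by
  have key : ∀ (e : PySem.Dict κ ν), e.contains k = true →
      (e.insert k y).items = e.items.map (fun p => if (p.1 == k) = true then (k, y) else p) := by
    intro e he
    simp [PySem.Dict.insert, he]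
  apply PySem.Dict.ext
  rw [key (d.insert k x) (PySem.Dict.contains_insert_self d k x)]
  by_cases h : d.contains k = true
  · rw [key d h]
    simp only [PySem.Dict.insert, h, if_true, List.map_map]
    apply List.map_congr_left
    intro p _
    by_cases hp : (p.1 == k) = true <;> simp [hp]
  · have hall : ∀ p ∈ d.items, (p.1 == k) = false := by
      intro p hp
      by_contra hc
      exact h (by simp only [PySem.Dict.contains, List.any_eq_true]; exact ⟨p, hp, by simpa using hc⟩)
    simp only [PySem.Dict.insert, h]
    have e1 : List.map (fun p => if (p.1 == k) = true then (k, y) else p) d.items = d.items := by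
      have := List.map_congr_left (l := d.items)
        (f := fun p => if (p.1 == k) = true then (k, y) else p) (g := id)
        (by intro p hp; simp [hall p hp])
      simpa using this
    simp [e1]

theorem pv_modify_insert_self {κ ν : Type} [BEq κ] [LawfulBEq κ]
    (d : PySem.Dict κ ν) (k : κ) (x d0 : ν) (f : ν → ν) :
    (d.insert k x).modify k d0 f = d.insert k (f x) := by
  simp [PySem.Dict.modify, PySem.Dict.getD_insert_self, pv_insert_insert]

theorem pv_finalize_concat (recs : List (String × String × List String))
    (r : String × String × List String) :
    pvFinalize (recs ++ [r]) = (pvFinalize recs).insert r.1 (r.2.1 ++ PySem.Str.join "" r.2.2) := by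
  simp [pvFinalize, List.foldl_append]

theorem pv_finalize_concat2 (recs : List (String × String × List String))
    (p q : String × String × List String) :
    pvFinalize (recs ++ [p, q]) =
      ((pvFinalize recs).insert p.1 (p.2.1 ++ PySem.Str.join "" p.2.2)).insert q.1
        (q.2.1 ++ PySem.Str.join "" q.2.2) := by
  rw [show recs ++ [p, q] = (recs ++ [p]) ++ [q] by simp, pv_finalize_concat, pv_finalize_concat]

-- the step-wise simulation invariant between A's state and B's state
theorem pv_step_pres (l : String) (d : PySem.Dict String String) (ck : Option String)
    (recs : List (String × String × List String)) (cur : Option (String × String × List String))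
    (h1 : ck = Option.map (fun r => r.1) cur) (h2 : d = pvFinalize (recs ++ cur.toList)) :
    (stepA (d, ck) l).2 = Option.map (fun r => r.1) (stepB (recs, cur) l).2 ∧
    (stepA (d, ck) l).1 = pvFinalize ((stepB (recs, cur) l).1 ++ ((stepB (recs, cur) l).2).toList) := by
  subst h1 h2
  cases cur with
  | none =>
      simp only [stepA, stepB, Option.map_none]
      by_cases hc : PySem.Str.isIn ":" l = true
      · simp only [hc, Bool.not_true, if_true]
        cases hs : PySem.Str.splitMax? l ":" 1 with
        | none => simp
        | some parts =>
            match parts with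
            | [] => simp
            | [a] => simp
            | a :: b :: t =>
                simp [pv_finalize_concat, pv_join_nil]
      · simp only [hc]
        simp
  | some r =>
      obtain ⟨k, v, c⟩ := r
      simp only [stepA, stepB, Option.map_some]
      by_cases hb : (PySem.Str.startswith l " " && (k != "")) = true
      · simp only [hb, if_true]
        constructor
        · simp
        · simp only [Option.toList_some]
          rw [pv_finalize_concat, pv_finalize_concat, pv_modify_insert_self, pv_join_concat]
          simp [String.append_assoc]
      · simp only [hb]
        by_cases hc : PySem.Str.isIn ":" l = true
        · simp only [hc, Bool.not_true, if_true]
          cases hs : PySem.Str.splitMax? l ":" 1 with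
          | none => simp
          | some parts =>
              match parts with
              | [] => simp
              | [a] => simp
              | a :: b :: t =>
                  simp [pv_finalize_concat2, pv_finalize_concat, pv_join_nil]
        · have hc2 : PySem.Str.isIn ":" l = false := by simpa using hc
          simp only [hc2]
          simp

theorem pv_fold_pres (lines : List String) :
    ∀ (d : PySem.Dict String String) (ck : Option String)
      (recs : List (String × String × List String)) (cur : Option (String × String × List String)),
    ck = Option.map (fun r => r.1) cur → d = pvFinalize (recs ++ cur.toList) →
    (lines.foldl stepA (d, ck)).1 =
      pvFinalize ((lines.foldl stepB (recs, cur)).1 ++ ((lines.foldl stepB (recs, cur)).2).toList) := by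
  induction lines with
  | nil => intro d ck recs cur h1 h2; simpa using h2
  | cons l ls ih =>
      intro d ck recs cur h1 h2
      simp only [List.foldl_cons]
      obtain ⟨g1, g2⟩ := pv_step_pres l d ck recs cur h1 h2
      have := ih (stepA (d, ck) l).1 (stepA (d, ck) l).2 (stepB (recs, cur) l).1 (stepB (recs, cur) l).2 g1 g2
      simpa using this

-- ===== VERDICT (by name: the statement is the Claim_ definition above) =====
theorem parse_manifest_attributes_spec : Claim_equal_parse_manifest_attributes := by
  unfold Claim_equal_parse_manifest_attributes
  intro text _
  unfold Spec_parse_manifest_attributes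
  by_cases h : text = ""
  · subst h; decide
  · have hb : (text == "") = false := by simp [h]
    show parse_manifest_attributes text = parse_manifest_attributes_alt text
    unfold parse_manifest_attributes parse_manifest_attributes_alt
    rw [hb]
    simp only [Bool.false_eq_true, if_false]
    have := pv_fold_pres (PySem.Str.splitlines text) PySem.Dict.empty none [] none rfl (by simp [pvFinalize])
    rw [this]
    rfl
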